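-- pv_equiv track=rewrite | github.com/n1ka1-4/GOA-homeworks | day101/homework/lesson0.py | burner
-- ===== SOURCE A (Python) =====
-- def burner(c,h,o):
--     h2o = co2 = ch4 = 0
--
--     while h > 1 and o > 0:
--         h2o += 1
--         h -= 2
--         o -= 1
--
--     while c > 0 and o > 1:
--         co2 += 1
--         c -= 1
--         o -= 2
--
--     while c > 0 and h > 3:
--         ch4 += 1
--         c -= 1
--         h -= 4
--
--     return h2o,co2,ch4
-- ===== SOURCE B (Python) =====
-- def burner(c, h, o):
--     # closed-form: each greedy while-loop's iteration count is a min/floor-division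
--     h2o = max(0, min(h // 2, o))
--     h -= 2 * h2o
--     o -= h2o
--     co2 = max(0, min(c, o // 2))
--     c -= co2
--     ch4 = max(0, min(c, h // 4))
--     return h2o, co2, ch4
-- ===== Notes on version B (the rewrite author's own statement) =====
-- stated objective: faster
-- what changed: Each of A's three greedy unit-step while-loops is replaced by a closed-form iteration count max(0, min(..., .../k)) using floor division, updating the remaining h, o, c arithmetically.
import Mathlib
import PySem

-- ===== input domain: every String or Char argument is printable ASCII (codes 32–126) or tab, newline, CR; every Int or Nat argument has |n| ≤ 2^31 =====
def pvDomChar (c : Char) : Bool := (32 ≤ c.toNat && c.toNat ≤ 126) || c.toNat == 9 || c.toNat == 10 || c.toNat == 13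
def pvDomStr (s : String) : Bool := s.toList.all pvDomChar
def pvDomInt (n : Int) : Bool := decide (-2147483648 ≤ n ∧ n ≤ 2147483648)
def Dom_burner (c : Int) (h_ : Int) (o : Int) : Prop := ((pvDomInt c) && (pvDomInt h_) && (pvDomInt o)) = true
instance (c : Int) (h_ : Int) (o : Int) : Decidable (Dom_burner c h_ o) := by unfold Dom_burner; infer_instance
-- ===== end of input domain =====

-- B replaces each of A's three greedy while-loops by a closed-form min/floor-division count (objective: faster).

-- ===== PORT A =====
-- while h > 1 and o > 0: h2o += 1; h -= 2; o -= 1   — state (h, o, h2o)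
def burnerLoop1 (h o h2o : Int) : Int × Int × Int :=
  if h > 1 ∧ o > 0 then burnerLoop1 (h - 2) (o - 1) (h2o + 1) else (h, o, h2o)
termination_by h.toNat
decreasing_by omega

-- while c > 0 and o > 1: co2 += 1; c -= 1; o -= 2   — state (c, o, co2)
def burnerLoop2 (c o co2 : Int) : Int × Int × Int :=
  if c > 0 ∧ o > 1 then burnerLoop2 (c - 1) (o - 2) (co2 + 1) else (c, o, co2)
termination_by o.toNat
decreasing_by omega

-- while c > 0 and h > 3: ch4 += 1; c -= 1; h -= 4   — state (c, h, ch4)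
def burnerLoop3 (c h ch4 : Int) : Int × Int × Int :=
  if c > 0 ∧ h > 3 then burnerLoop3 (c - 1) (h - 4) (ch4 + 1) else (c, h, ch4)
termination_by h.toNat
decreasing_by omega

def burner (c : Int) (h_ : Int) (o : Int) : List Int :=
  let s1 := burnerLoop1 h_ o 0
  let s2 := burnerLoop2 c s1.2.1 0
  let s3 := burnerLoop3 s2.1 s1.1 0
  [s1.2.2, s2.2.2, s3.2.2]

-- ===== PORT B =====
def burner_alt (c : Int) (h_ : Int) (o : Int) : List Int :=
  let h2o := max 0 (min (PySem.Int.floordiv h_ 2) o)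
  let h1 := h_ - 2 * h2o
  let o1 := o - h2o
  let co2 := max 0 (min c (PySem.Int.floordiv o1 2))
  let c1 := c - co2
  let ch4 := max 0 (min c1 (PySem.Int.floordiv h1 4))
  [h2o, co2, ch4]

-- ===== PRECONDITION & SPEC =====
def Spec_burner (c : Int) (h_ : Int) (o : Int) (out : List Int) : Prop := out = burner_alt c h_ o
instance (c : Int) (h_ : Int) (o : Int) (out : List Int) : Decidable (Spec_burner c h_ o out) := by unfold Spec_burner; infer_instance

-- ===== CLAIM (what is proved, stated in full; the proofs are below) =====
def Claim_equal_burner : Prop := ∀ (c : Int) (h_ : Int) (o : Int), Dom_burner c h_ o → Spec_burner c h_ o (burner c h_ o)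

-- ===== LEMMAS AND PROOFS =====

theorem burnerLoop1_eq (h o a : Int) :
    burnerLoop1 h o a = (h - 2 * max 0 (min (h / 2) o), o - max 0 (min (h / 2) o), a + max 0 (min (h / 2) o)) := by
  induction h, o, a using burnerLoop1.induct with
  | case1 h o a hcond ih =>
      rw [burnerLoop1, if_pos hcond, ih]
      simp only [Prod.mk.injEq]
      refine ⟨by omega, by omega, by omega⟩
  | case2 h o a hcond =>
      rw [burnerLoop1, if_neg hcond]
      simp only [Prod.mk.injEq]
      refine ⟨by omega, by omega, by omega⟩

theorem burnerLoop2_eq (c o a : Int) :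
    burnerLoop2 c o a = (c - max 0 (min c (o / 2)), o - 2 * max 0 (min c (o / 2)), a + max 0 (min c (o / 2))) := by
  induction c, o, a using burnerLoop2.induct with
  | case1 c o a hcond ih =>
      rw [burnerLoop2, if_pos hcond, ih]
      simp only [Prod.mk.injEq]
      refine ⟨by omega, by omega, by omega⟩
  | case2 c o a hcond =>
      rw [burnerLoop2, if_neg hcond]
      simp only [Prod.mk.injEq]
      refine ⟨by omega, by omega, by omega⟩

theorem burnerLoop3_eq (c h a : Int) :
    burnerLoop3 c h a = (c - max 0 (min c (h / 4)), h - 4 * max 0 (min c (h / 4)), a + max 0 (min c (h / 4))) := by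
  induction c, h, a using burnerLoop3.induct with
  | case1 c h a hcond ih =>
      rw [burnerLoop3, if_pos hcond, ih]
      simp only [Prod.mk.injEq]
      refine ⟨by omega, by omega, by omega⟩
  | case2 c h a hcond =>
      rw [burnerLoop3, if_neg hcond]
      simp only [Prod.mk.injEq]
      refine ⟨by omega, by omega, by omega⟩

-- ===== VERDICT (by name: the statement is the Claim_ definition above) =====
theorem burner_spec : Claim_equal_burner := by
  intro c h_ o _
  show burner c h_ o = burner_alt c h_ o
  unfold burner burner_alt
  simp only [show ∀ a : Int, PySem.Int.floordiv a 2 = a / 2 from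
        fun a => PySem.Int.floordiv_eq_ediv_of_pos (by norm_num),
      show ∀ a : Int, PySem.Int.floordiv a 4 = a / 4 from
        fun a => PySem.Int.floordiv_eq_ediv_of_pos (by norm_num)]
  simp only [burnerLoop1_eq, burnerLoop2_eq, burnerLoop3_eq, List.cons.injEq, and_true]
  refine ⟨by omega, by omega, by omega⟩
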